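-- pv_equiv track=rewrite | github.com/pypi-data/pypi-mirror-33 | packages/shoelaces/shoelaces-1.6.tar.gz/shoelaces-1.6/shoelaces/resource.py | sumWig
-- ===== SOURCE A (Python) =====
-- def sumWig(inputWig, lengths = []):
--     result = {}
--     for length, wig in inputWig.items():
--         if lengths and not length in lengths:
--             continue
--
--         for chromosome, hist in wig.items():
--             try:
--                 result[chromosome]
--             except KeyError:
--                 result[chromosome] = hist.copy()
--
--                 continue
--
--             for pos, count, in hist.items():
--                 try:
--                     result[chromosome][pos] += count
--                 except KeyError:
--                     result[chromosome][pos] = count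
--
--     return result
-- ===== SOURCE B (Python) =====
-- def sumWig(inputWig, lengths = []):
--     # Two staged passes instead of A's single interleaved merge:
--     # stage 1 groups every (pos, count) pair under its chromosome, in encounter order;
--     # stage 2 sums each chromosome's pair list into its histogram.
--     groups = {}
--     for length, wig in inputWig.items():
--         if lengths and length not in lengths:
--             continue
--         for chromosome, hist in wig.items():
--             g = groups.setdefault(chromosome, [])
--             for pos, count in hist.items():
--                 g.append((pos, count))
--     result = {}
--     for chromosome, pairs in groups.items():
--         h = {}
--         for pos, count in pairs:
--             h[pos] = h.get(pos, 0) + count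
--         result[chromosome] = h
--     return result
-- ===== Notes on version B (the rewrite author's own statement) =====
-- stated objective: alternative
-- what changed: Replaces A's single interleaved merge (copy the first hist per chromosome, then try/except per-position additions into the growing result) by two staged passes over a different intermediate structure: first group every (pos, count) pair into a per-chromosome list, then sum each chromosome's pair list into its histogram.
import Mathlib
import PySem

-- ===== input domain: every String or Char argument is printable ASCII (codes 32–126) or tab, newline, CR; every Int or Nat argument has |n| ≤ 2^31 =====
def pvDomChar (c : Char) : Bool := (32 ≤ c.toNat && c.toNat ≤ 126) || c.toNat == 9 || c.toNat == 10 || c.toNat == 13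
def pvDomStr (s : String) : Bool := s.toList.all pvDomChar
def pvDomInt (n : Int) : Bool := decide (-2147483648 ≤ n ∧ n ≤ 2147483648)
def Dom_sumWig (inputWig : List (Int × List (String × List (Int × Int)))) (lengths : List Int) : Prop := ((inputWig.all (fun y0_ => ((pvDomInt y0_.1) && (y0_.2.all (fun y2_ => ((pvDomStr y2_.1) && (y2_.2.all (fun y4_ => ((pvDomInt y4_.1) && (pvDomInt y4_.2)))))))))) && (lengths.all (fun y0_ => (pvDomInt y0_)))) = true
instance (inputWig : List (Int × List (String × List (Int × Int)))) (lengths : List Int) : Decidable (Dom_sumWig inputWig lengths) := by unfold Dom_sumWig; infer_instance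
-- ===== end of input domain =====

-- B replaces A's single interleaved merge by two staged passes: group all (pos, count) pairs per chromosome, then sum each group (alternative decomposition, same cost).

-- ===== PORT A =====
def sumWig (inputWig : List (Int × List (String × List (Int × Int)))) (lengths : List Int) : List (String × List (Int × Int)) :=
  let result : PySem.Dict String (PySem.Dict Int Int) :=
    inputWig.foldl (fun result lw =>
      if lengths ≠ [] ∧ lw.1 ∉ lengths then result
      else lw.2.foldl (fun result ch =>
        match result.get? ch.1 with
        | none => result.insert ch.1 (PySem.Dict.ofList ch.2)   -- result[chromosome] = hist.copy(); continue
        | some _ =>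
          ch.2.foldl (fun result pc =>
            -- result[chromosome][pos] += count / except KeyError: = count
            result.modify ch.1 PySem.Dict.empty (fun h => h.modify pc.1 0 (· + pc.2))) result)
        result) PySem.Dict.empty
  result.items.map (fun ch => (ch.1, ch.2.items))

-- ===== PORT B =====
def sumWig_alt (inputWig : List (Int × List (String × List (Int × Int)))) (lengths : List Int) : List (String × List (Int × Int)) :=
  -- stage 1: group every (pos, count) pair under its chromosome, in encounter order
  let groups : PySem.Dict String (List (Int × Int)) :=
    inputWig.foldl (fun groups lw =>
      if lengths ≠ [] ∧ lw.1 ∉ lengths then groups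
      else lw.2.foldl (fun groups ch =>
        let groups1 := groups.setdefault ch.1 []                 -- g = groups.setdefault(chromosome, [])
        groups1.insert ch.1
          (ch.2.foldl (fun g pc => g ++ [pc]) (groups1.getD ch.1 [])))   -- g.append((pos, count))
        groups) PySem.Dict.empty
  -- stage 2: sum each chromosome's pair list
  let result : PySem.Dict String (PySem.Dict Int Int) :=
    groups.items.foldl (fun result cp =>
      result.insert cp.1
        (cp.2.foldl (fun h pc => h.insert pc.1 (h.getD pc.1 0 + pc.2)) PySem.Dict.empty))   -- h[pos] = h.get(pos, 0) + count
      PySem.Dict.empty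
  result.items.map (fun ch => (ch.1, ch.2.items))

-- ===== PRECONDITION & SPEC =====
-- Pre_ excludes association lists with duplicate keys at any of the three dict levels: the arguments
-- represent Python dicts (which cannot hold duplicate keys), so on such lists neither port has a Python
-- behaviour to match and A's dict construction would have collapsed them before the call.
def Pre_sumWig (inputWig : List (Int × List (String × List (Int × Int)))) (lengths : List Int) : Prop :=
  (inputWig.map (·.1)).Nodup ∧
    ∀ lw ∈ inputWig, (lw.2.map (·.1)).Nodup ∧ ∀ ch ∈ lw.2, (ch.2.map (·.1)).Nodup
instance (inputWig : List (Int × List (String × List (Int × Int)))) (lengths : List Int) : Decidable (Pre_sumWig inputWig lengths) := by unfold Pre_sumWig; infer_instance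

def pvWitness_sumWig : (List (Int × List (String × List (Int × Int)))) × List Int :=
  ([(1, [("c", [(0, 1), (1, 2)])]), (2, [("c", [(0, 3)])])], [])

def Spec_sumWig (inputWig : List (Int × List (String × List (Int × Int)))) (lengths : List Int) (out : List (String × List (Int × Int))) : Prop := out = sumWig_alt inputWig lengths
instance (inputWig : List (Int × List (String × List (Int × Int)))) (lengths : List Int) (out : List (String × List (Int × Int))) : Decidable (Spec_sumWig inputWig lengths out) := by unfold Spec_sumWig; infer_instance

-- ===== CLAIM (what is proved, stated in full; the proofs are below) =====
def Claim_equal_sumWig : Prop := ∀ (inputWig : List (Int × List (String × List (Int × Int)))) (lengths : List Int), Dom_sumWig inputWig lengths → Pre_sumWig inputWig lengths → Spec_sumWig inputWig lengths (sumWig inputWig lengths)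

-- ===== LEMMAS AND PROOFS =====
theorem pv_insert_getD_self {κ ν : Type} [BEq κ] [LawfulBEq κ] (d : PySem.Dict κ ν) (k : κ) (dflt : ν)
    (hc : d.contains k = true) (hnd : d.keys.Nodup) : d.insert k (d.getD k dflt) = d := by
  apply PySem.Dict.ext
  rw [PySem.Dict.items_insert, if_pos hc]
  conv_rhs => rw [← List.map_id d.items]
  apply List.map_congr_left
  intro p hp
  obtain ⟨a, b⟩ := p
  by_cases hk : a = k
  · subst hk
    simp [PySem.Dict.getD_of_mem_items (d := d) (d0 := dflt) hp hnd]
  · simp [hk]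

theorem pv_addFold_eq_insertFold (hist : List (Int × Int)) (d : PySem.Dict Int Int)
    (hnd : (hist.map (·.1)).Nodup) (hfresh : ∀ k ∈ hist.map (·.1), d.contains k = false) :
    hist.foldl (fun h pc => h.insert pc.1 (h.getD pc.1 0 + pc.2)) d
      = hist.foldl (fun h pc => h.insert pc.1 pc.2) d := by
  induction hist generalizing d with
  | nil => rfl
  | cons p t ih =>
    simp only [List.foldl_cons]
    have h0 : d.getD p.1 0 = 0 := PySem.Dict.getD_of_not_contains (d := d) (k := p.1) (d0 := 0) (hfresh p.1 (by simp))
    rw [h0, zero_add]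
    apply ih
    · simpa using hnd.of_cons
    · intro k hk
      rw [PySem.Dict.contains_insert]
      have hne : k ≠ p.1 := by
        simp only [List.map_cons, List.nodup_cons] at hnd
        exact fun he => hnd.1 (he ▸ hk)
      simp [hne, hfresh k (by simp [hk])]

theorem pv_mergeFold_eq (hist : List (Int × Int)) (d : PySem.Dict String (PySem.Dict Int Int)) (c : String)
    (hc : d.contains c = true) (hnd : d.keys.Nodup) :
    hist.foldl (fun result pc =>
        result.modify c PySem.Dict.empty (fun h => h.modify pc.1 0 (· + pc.2))) d
      = d.insert c (hist.foldl (fun h pc => h.insert pc.1 (h.getD pc.1 0 + pc.2))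
          (d.getD c PySem.Dict.empty)) := by
  induction hist generalizing d with
  | nil => exact (pv_insert_getD_self d c PySem.Dict.empty hc hnd).symm
  | cons pc t ih =>
    simp only [List.foldl_cons]
    rw [ih (d.modify c PySem.Dict.empty (fun h => h.modify pc.1 0 (· + pc.2)))
        (by simp [PySem.Dict.modify])
        (by simp only [PySem.Dict.modify]; exact PySem.Dict.nodup_keys_insert _ _ _ hnd)]
    rw [PySem.Dict.getD_modify_self]
    simp only [PySem.Dict.modify, PySem.Dict.insert_insert_self]

theorem pv_chStep_eq (ch : String × List (Int × Int)) (d : PySem.Dict String (PySem.Dict Int Int))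
    (hnd : d.keys.Nodup) (hh : (ch.2.map (·.1)).Nodup) :
    (match d.get? ch.1 with
     | none => d.insert ch.1 (PySem.Dict.ofList ch.2)
     | some _ =>
       ch.2.foldl (fun result pc =>
         result.modify ch.1 PySem.Dict.empty (fun h => h.modify pc.1 0 (· + pc.2))) d)
      = (let d1 := d.setdefault ch.1 PySem.Dict.empty
         let h := d1.getD ch.1 PySem.Dict.empty
         d1.insert ch.1 (ch.2.foldl (fun h pc => h.insert pc.1 (h.getD pc.1 0 + pc.2)) h)) := by
  cases hg : d.get? ch.1 with
  | none =>
    have hc : d.contains ch.1 = false := by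
      rw [PySem.Dict.get?_eq_none_iff_contains] at hg; exact hg
    simp only [PySem.Dict.setdefault_of_not_contains (h := hc)]
    rw [PySem.Dict.getD_insert_self, PySem.Dict.insert_insert_self]
    congr 1
    rw [pv_addFold_eq_insertFold _ _ hh (by intro k hk; simp [PySem.Dict.contains_empty])]
    rfl
  | some v =>
    have hc : d.contains ch.1 = true := by
      simp [PySem.Dict.contains_eq_isSome_get?, hg]
    simp only [PySem.Dict.setdefault_of_contains (h := hc)]
    exact pv_mergeFold_eq ch.2 d ch.1 hc hnd

theorem pv_wigFold (wig : List (String × List (Int × Int))) (d : PySem.Dict String (PySem.Dict Int Int))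
    (hnd : d.keys.Nodup) (hw : ∀ ch ∈ wig, (ch.2.map (·.1)).Nodup) :
    (wig.foldl (fun result ch =>
        match result.get? ch.1 with
        | none => result.insert ch.1 (PySem.Dict.ofList ch.2)
        | some _ =>
          ch.2.foldl (fun result pc =>
            result.modify ch.1 PySem.Dict.empty (fun h => h.modify pc.1 0 (· + pc.2))) result) d
      = wig.foldl (fun result ch =>
          let result1 := result.setdefault ch.1 PySem.Dict.empty
          let h := result1.getD ch.1 PySem.Dict.empty
          result1.insert ch.1 (ch.2.foldl (fun h pc => h.insert pc.1 (h.getD pc.1 0 + pc.2)) h)) d)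
    ∧ (wig.foldl (fun result ch =>
        match result.get? ch.1 with
        | none => result.insert ch.1 (PySem.Dict.ofList ch.2)
        | some _ =>
          ch.2.foldl (fun result pc =>
            result.modify ch.1 PySem.Dict.empty (fun h => h.modify pc.1 0 (· + pc.2))) result) d).keys.Nodup := by
  induction wig generalizing d with
  | nil => exact ⟨rfl, hnd⟩
  | cons ch t ih =>
    have hstep := pv_chStep_eq ch d hnd (hw ch (by simp))
    have hstepnd : (match d.get? ch.1 with
        | none => d.insert ch.1 (PySem.Dict.ofList ch.2)
        | some _ =>
          ch.2.foldl (fun (result : PySem.Dict String (PySem.Dict Int Int)) (pc : Int × Int) =>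
            result.modify ch.1 PySem.Dict.empty (fun h => h.modify pc.1 0 (· + pc.2))) d).keys.Nodup := by
      rw [hstep]
      simp only []
      exact PySem.Dict.nodup_keys_insert _ _ _
        (by cases hcc : d.contains ch.1 with
            | true => rw [PySem.Dict.setdefault_of_contains (h := hcc)]; exact hnd
            | false => rw [PySem.Dict.setdefault_of_not_contains (h := hcc)]
                       exact PySem.Dict.nodup_keys_insert _ _ _ hnd)
    simp only [List.foldl_cons]
    obtain ⟨ihe, ihn⟩ := ih _ hstepnd (fun c hc => hw c (by simp [hc]))
    refine ⟨?_, ihn⟩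
    have hstep' : (match d.get? ch.1 with
        | none => d.insert ch.1 (PySem.Dict.ofList ch.2)
        | some _ =>
          ch.2.foldl (fun (result : PySem.Dict String (PySem.Dict Int Int)) (pc : Int × Int) =>
            result.modify ch.1 PySem.Dict.empty (fun h => h.modify pc.1 0 (· + pc.2))) d)
        = (d.setdefault ch.1 PySem.Dict.empty).insert ch.1
            (ch.2.foldl (fun h pc => h.insert pc.1 (h.getD pc.1 0 + pc.2))
              ((d.setdefault ch.1 PySem.Dict.empty).getD ch.1 PySem.Dict.empty)) := hstep
    rw [← hstep']
    exact ihe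

-- flattening the filtered outer loop: 'skip or iterate the inner list' = one fold over the flattened kept items
theorem pv_foldl_skip {α β : Type} (lengths : List Int) (g : β → α → β) (l : List (Int × List α)) (d : β) :
    l.foldl (fun d lw => if lengths ≠ [] ∧ lw.1 ∉ lengths then d else lw.2.foldl g d) d
      = ((l.filter (fun lw => !decide (lengths ≠ [] ∧ lw.1 ∉ lengths))).flatMap (·.2)).foldl g d := by
  induction l generalizing d with
  | nil => rfl
  | cons lw t ih =>
    simp only [List.foldl_cons, List.filter_cons]
    by_cases h : lengths ≠ [] ∧ lw.1 ∉ lengths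
    · rw [if_pos h, ih, if_neg (by simp [h])]
    · rw [if_neg h, if_pos (by simp [h]), List.flatMap_cons, List.foldl_append, ih]

-- joint invariant: the merged dict of A (in its setdefault normal form) at each chromosome is the
-- sum-fold of B's grouped pair list, and both sides create chromosome keys in the same order
theorem pv_NG (E : List (String × List (Int × Int))) (d : PySem.Dict String (PySem.Dict Int Int))
    (g : PySem.Dict String (List (Int × Int)))
    (hk : d.keys = g.keys)
    (hv : ∀ c, d.getD c PySem.Dict.empty
        = (g.getD c []).foldl (fun h pc => h.insert pc.1 (h.getD pc.1 0 + pc.2)) PySem.Dict.empty) :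
    (E.foldl (fun result ch =>
        let result1 := result.setdefault ch.1 PySem.Dict.empty
        let h := result1.getD ch.1 PySem.Dict.empty
        result1.insert ch.1 (ch.2.foldl (fun h pc => h.insert pc.1 (h.getD pc.1 0 + pc.2)) h)) d).keys
      = (E.foldl (fun groups ch =>
          let groups1 := groups.setdefault ch.1 []
          groups1.insert ch.1 (ch.2.foldl (fun g pc => g ++ [pc]) (groups1.getD ch.1 []))) g).keys
    ∧ ∀ c, (E.foldl (fun result ch =>
        let result1 := result.setdefault ch.1 PySem.Dict.empty
        let h := result1.getD ch.1 PySem.Dict.empty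
        result1.insert ch.1 (ch.2.foldl (fun h pc => h.insert pc.1 (h.getD pc.1 0 + pc.2)) h)) d).getD c PySem.Dict.empty
        = ((E.foldl (fun groups ch =>
            let groups1 := groups.setdefault ch.1 []
            groups1.insert ch.1 (ch.2.foldl (fun g pc => g ++ [pc]) (groups1.getD ch.1 []))) g).getD c []).foldl
            (fun h pc => h.insert pc.1 (h.getD pc.1 0 + pc.2)) PySem.Dict.empty := by
  induction E generalizing d g with
  | nil => exact ⟨hk, hv⟩
  | cons e t ih =>
    simp only [List.foldl_cons]
    have hcontains : d.contains e.1 = g.contains e.1 := by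
      rw [PySem.Dict.contains_eq_decide_mem_keys, PySem.Dict.contains_eq_decide_mem_keys, hk]
    apply ih
    · -- keys after one step stay equal
      show ((d.setdefault e.1 PySem.Dict.empty).insert e.1 _).keys
          = ((g.setdefault e.1 []).insert e.1 _).keys
      rw [PySem.Dict.keys_insert_of_contains _ _
            (by rw [PySem.Dict.contains_setdefault]; simp),
          PySem.Dict.keys_insert_of_contains _ _
            (by rw [PySem.Dict.contains_setdefault]; simp),
          PySem.Dict.keys_setdefault, PySem.Dict.keys_setdefault, hcontains, hk]
    · -- values after one step stay related
      intro c
      show ((d.setdefault e.1 PySem.Dict.empty).insert e.1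
              (e.2.foldl (fun h pc => h.insert pc.1 (h.getD pc.1 0 + pc.2))
                ((d.setdefault e.1 PySem.Dict.empty).getD e.1 PySem.Dict.empty))).getD c PySem.Dict.empty
          = (((g.setdefault e.1 []).insert e.1
              (e.2.foldl (fun g pc => g ++ [pc])
                ((g.setdefault e.1 []).getD e.1 []))).getD c []).foldl
              (fun h pc => h.insert pc.1 (h.getD pc.1 0 + pc.2)) PySem.Dict.empty
      by_cases hce : c = e.1
      · subst hce
        rw [PySem.Dict.getD_insert_self, PySem.Dict.getD_insert_self,
            PySem.Dict.getD_setdefault_self, PySem.Dict.getD_setdefault_self,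
            PySem.List.foldl_append_singleton_eq_self, List.foldl_append, ← hv e.1]
      · have h1 : (d.setdefault e.1 PySem.Dict.empty).getD c PySem.Dict.empty
            = d.getD c PySem.Dict.empty := by
          rw [PySem.Dict.getD_eq_get?_getD, PySem.Dict.get?_setdefault_of_ne _ _ hce,
              ← PySem.Dict.getD_eq_get?_getD]
        have h2 : (g.setdefault e.1 []).getD c [] = g.getD c [] := by
          rw [PySem.Dict.getD_eq_get?_getD, PySem.Dict.get?_setdefault_of_ne _ _ hce,
              ← PySem.Dict.getD_eq_get?_getD]
        rw [PySem.Dict.getD_insert_of_ne _ _ _ hce, PySem.Dict.getD_insert_of_ne _ _ _ hce,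
            h1, h2]
        exact hv c

-- end-to-end: A's merged dict, mapped to items, equals B's two-stage group-then-sum result
theorem pv_main (E : List (String × List (Int × Int)))
    (hw : ∀ ch ∈ E, (ch.2.map (·.1)).Nodup) :
    (E.foldl (fun result ch =>
        match result.get? ch.1 with
        | none => result.insert ch.1 (PySem.Dict.ofList ch.2)
        | some _ =>
          ch.2.foldl (fun result pc =>
            result.modify ch.1 PySem.Dict.empty (fun h => h.modify pc.1 0 (· + pc.2))) result)
      PySem.Dict.empty).items.map (fun ch => (ch.1, ch.2.items))
    = (((E.foldl (fun groups ch =>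
          let groups1 := groups.setdefault ch.1 []
          groups1.insert ch.1 (ch.2.foldl (fun g pc => g ++ [pc]) (groups1.getD ch.1 [])))
        PySem.Dict.empty).items.foldl (fun result cp =>
          result.insert cp.1
            (cp.2.foldl (fun h pc => h.insert pc.1 (h.getD pc.1 0 + pc.2)) PySem.Dict.empty))
        PySem.Dict.empty).items.map (fun ch => (ch.1, ch.2.items))) := by
  obtain ⟨hAN, hndA⟩ := pv_wigFold E PySem.Dict.empty (by simp) hw
  rw [hAN]
  rw [hAN] at hndA
  obtain ⟨hkeys, hvals⟩ := pv_NG E PySem.Dict.empty PySem.Dict.empty (by simp) (by intro c; simp)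
  have hndG : ((E.foldl (fun groups ch =>
      let groups1 := groups.setdefault ch.1 []
      groups1.insert ch.1 (ch.2.foldl (fun g pc => g ++ [pc]) (groups1.getD ch.1 [])))
      PySem.Dict.empty)).keys.Nodup := by
    rw [← hkeys]; exact hndA
  have hit := PySem.Dict.items_foldl_insert_fresh
      (E.foldl (fun groups ch =>
        let groups1 := groups.setdefault ch.1 []
        groups1.insert ch.1 (ch.2.foldl (fun g pc => g ++ [pc]) (groups1.getD ch.1 [])))
        PySem.Dict.empty).items
      (fun cp : String × List (Int × Int) => cp.1)
      (fun cp => cp.2.foldl (fun h pc => h.insert pc.1 (h.getD pc.1 0 + pc.2)) PySem.Dict.empty)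
      PySem.Dict.empty
      (by intro a _; simp)
      (by simpa [PySem.Dict.keys] using hndG)
  rw [hit]
  rw [PySem.Dict.items_eq_map_keys _ hndA PySem.Dict.empty,
      PySem.Dict.items_eq_map_keys _ hndG []]
  have hie : (PySem.Dict.empty : PySem.Dict String (PySem.Dict Int Int)).items = [] := rfl
  simp only [List.map_map, hie, List.nil_append]
  rw [hkeys]
  apply List.map_congr_left
  intro c hc
  simp only [Function.comp_apply]
  rw [hvals c]

-- ===== VERDICT (by name: the statement is the Claim_ definition above) =====
theorem sumWig_spec : Claim_equal_sumWig := by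
  intro iw lengths _ hpre
  unfold Spec_sumWig sumWig sumWig_alt
  obtain ⟨-, h2⟩ := hpre
  rw [pv_foldl_skip, pv_foldl_skip]
  exact pv_main _ (by
    intro ch hch
    simp only [List.mem_flatMap, List.mem_filter] at hch
    obtain ⟨lw, ⟨hlw, -⟩, hch⟩ := hch
    exact (h2 lw hlw).2 ch hch)
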